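-- pv_equiv track=rewrite | github.com/Taren810/ciPYher | cipyher.py | POLYBIUS_CUBE
-- ===== SOURCE A (Python) =====
-- def POLYBIUS_CUBE(alfa, key=3):
--     matrix = []
--     for i in range(0, key):
--         matrix.append([])
--         for j in range(0, key):
--             matrix[i].append([])
--             for k in range(0, key):
--                 matrix[i][j].append(" ")
--
--     if len(alfa)>(key*key*key):
--         n = key*key*key
--     else:
--         n = len(alfa)
--
--     pos = -1
--     pos2 = -1
--     for i in range(0, n):
--         if i%(key*key) == 0:
--             pos2 += 1
--             pos = -1
--         if i%key == 0:
--             pos += 1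
--         matrix[pos2][pos][i%key] = alfa[i]
--
--     return (matrix)
-- ===== SOURCE B (Python) =====
-- def POLYBIUS_CUBE(alfa, key=3):
--     n = min(len(alfa), key * key * key)
--     return [[[alfa[i * key * key + j * key + k]
--               if i * key * key + j * key + k < n else " "
--               for k in range(key)]
--              for j in range(key)]
--             for i in range(key)]
-- ===== Notes on version B (the rewrite author's own statement) =====
-- stated objective: simpler
-- what changed: Replaces A's two-phase build (allocate a cube of spaces, then overwrite cells while tracking pos/pos2 counters through a second loop) with a single triple comprehension that picks each cell directly by its closed-form index i*key*key+j*key+k.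
import Mathlib
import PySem

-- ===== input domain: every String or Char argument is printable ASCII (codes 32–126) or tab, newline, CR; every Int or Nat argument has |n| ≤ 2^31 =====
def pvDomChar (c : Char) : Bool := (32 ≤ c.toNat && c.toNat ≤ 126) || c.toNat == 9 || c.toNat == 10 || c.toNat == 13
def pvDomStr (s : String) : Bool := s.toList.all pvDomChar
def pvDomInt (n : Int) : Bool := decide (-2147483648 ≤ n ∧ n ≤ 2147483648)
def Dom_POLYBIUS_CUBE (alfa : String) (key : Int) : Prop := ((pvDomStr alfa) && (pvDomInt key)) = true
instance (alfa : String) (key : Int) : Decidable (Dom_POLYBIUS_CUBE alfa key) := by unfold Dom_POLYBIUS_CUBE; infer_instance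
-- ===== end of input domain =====

-- B replaces A's allocate-then-overwrite two-phase construction by one direct
-- triple comprehension with a closed-form index; equal return value, simpler code.

-- ===== PORT A =====
-- matrix[a][b][c] = v; on every reachable state the indices are nonnegative and in range,
-- so the out-of-range no-op of List.set is never exercised.
def pvSet3 (m : List (List (List String))) (a b c : Int) (v : String) :
    List (List (List String)) :=
  m.set a.toNat
    ((m.getD a.toNat []).set b.toNat
      (((m.getD a.toNat []).getD b.toNat []).set c.toNat v))

def POLYBIUS_CUBE (alfa : String) (key : Int) : List (List (List String)) :=
  -- phase 1: build the key×key×key cube of spaces by successive appends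
  let matrix : List (List (List String)) :=
    (PySem.List.pyRange 0 key 1).foldl (fun m _ =>
      m ++ [(PySem.List.pyRange 0 key 1).foldl (fun r _ =>
        r ++ [(PySem.List.pyRange 0 key 1).foldl (fun p _ => p ++ [" "]) []]) []]) []
  let n : Int := if (PySem.Str.len alfa) > key * key * key then key * key * key
                 else PySem.Str.len alfa
  -- phase 2: fill, tracking pos / pos2 exactly as A does
  let st :=
    (PySem.List.pyRange 0 n 1).foldl
      (fun (st : List (List (List String)) × Int × Int) i =>
        let m := st.1
        let pos := st.2.1
        let pos2 := st.2.2
        let pp : Int × Int :=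
          if PySem.Int.mod i (key * key) = 0 then (-1, pos2 + 1) else (pos, pos2)
        let pos2 := pp.2
        let pos := if PySem.Int.mod i key = 0 then pp.1 + 1 else pp.1
        (pvSet3 m pos2 pos (PySem.Int.mod i key)
          (((PySem.Str.pyGet? alfa i).map (fun ch => String.ofList [ch])).getD " "),
         pos, pos2))
      (matrix, -1, -1)
  st.1

-- ===== PORT B =====
def POLYBIUS_CUBE_alt (alfa : String) (key : Int) : List (List (List String)) :=
  let n : Int := min (PySem.Str.len alfa) (key * key * key)
  (PySem.List.pyRange 0 key 1).map (fun i =>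
    (PySem.List.pyRange 0 key 1).map (fun j =>
      (PySem.List.pyRange 0 key 1).map (fun k =>
        if i * key * key + j * key + k < n then
          ((PySem.Str.pyGet? alfa (i * key * key + j * key + k)).map
            (fun ch => String.ofList [ch])).getD " "
        else " ")))

-- ===== PRECONDITION & SPEC =====
def Spec_POLYBIUS_CUBE (alfa : String) (key : Int) (out : List (List (List String))) : Prop := out = POLYBIUS_CUBE_alt alfa key
instance (alfa : String) (key : Int) (out : List (List (List String))) : Decidable (Spec_POLYBIUS_CUBE alfa key out) := by unfold Spec_POLYBIUS_CUBE; infer_instance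

-- ===== CLAIM (what is proved, stated in full; the proofs are below) =====
def Claim_equal_POLYBIUS_CUBE : Prop := ∀ (alfa : String) (key : Int), Dom_POLYBIUS_CUBE alfa key → Spec_POLYBIUS_CUBE alfa key (POLYBIUS_CUBE alfa key)

-- ===== LEMMAS AND PROOFS =====

-- character / cell / cube abstractions used only by the proofs
def pvCh (s : List Char) (m : Nat) : String :=
  ((s[m]?).map (fun ch => String.ofList [ch])).getD " "

def pvCell (s : List Char) (N m : Nat) : String := if m < N then pvCh s m else " "

def pvCube (s : List Char) (K N : Nat) : List (List (List String)) :=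
  (List.range K).map (fun a => (List.range K).map (fun b =>
    (List.range K).map (fun c => pvCell s N (a * (K * K) + b * K + c))))

def pvPos2 (K N : Nat) : Int := if N = 0 then -1 else ((N - 1) / (K * K) : Nat)
def pvPos (K N : Nat) : Int := if N = 0 then -1 else (((N - 1) % (K * K)) / K : Nat)

lemma pv_pred_mod (k N : Nat) (hkpos : 0 < k) (h : ¬ k ∣ N) :
    (N - 1) % k = N % k - 1 := by
  have hr : N % k ≠ 0 := fun h0 => h (Nat.dvd_iff_mod_eq_zero.mpr h0)
  have hd := Nat.div_add_mod N k
  have hlt : N % k < k := Nat.mod_lt _ hkpos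
  have : N - 1 = k * (N / k) + (N % k - 1) := by omega
  rw [this, Nat.mul_add_mod, Nat.mod_eq_of_lt (by omega)]

lemma pv_succ_div_dvd (k N : Nat) (h : k ∣ N) (hN : N ≠ 0) :
    (N - 1) / k + 1 = N / k := by
  have h1 : N = (N - 1) + 1 := by omega
  conv_rhs => rw [h1]
  rw [Nat.succ_div, if_pos (by rw [← h1]; exact h)]

lemma pv_succ_div_not_dvd (k N : Nat) (h : ¬ k ∣ N) :
    (N - 1) / k = N / k := by
  have hN : N ≠ 0 := fun h0 => h (h0 ▸ dvd_zero k)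
  have h1 : N = (N - 1) + 1 := by omega
  conv_rhs => rw [h1]
  rw [Nat.succ_div, if_neg (by rw [← h1]; exact h)]
  omega

lemma pv_digits3 (K x y z : Nat) (hK : 0 < K) (hy : y < K) (hz : z < K) :
    (x * (K * K) + y * K + z) / (K * K) = x ∧
    ((x * (K * K) + y * K + z) % (K * K)) / K = y ∧
    (x * (K * K) + y * K + z) % K = z := by
  have hw : y * K + z < K * K := by
    have h1 : y * K + z < (y + 1) * K := by rw [Nat.succ_mul]; omega
    have h2 : (y + 1) * K ≤ K * K := Nat.mul_le_mul_right _ (by omega)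
    omega
  have hKK : 0 < K * K := Nat.mul_pos hK hK
  have hform : x * (K * K) + y * K + z = K * K * x + (y * K + z) := by ring
  refine ⟨?_, ?_, ?_⟩
  · rw [hform, Nat.mul_add_div hKK, Nat.div_eq_of_lt hw]
    omega
  · rw [hform, Nat.mul_add_mod, Nat.mod_eq_of_lt hw, mul_comm y K,
      Nat.mul_add_div hK, Nat.div_eq_of_lt hz]
    omega
  · have h3 : x * (K * K) + y * K + z = K * (K * x + y) + z := by ring
    rw [h3, Nat.mul_add_mod, Nat.mod_eq_of_lt hz]

lemma pv_recompose (K N : Nat) (hK : 0 < K) :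
    N / (K * K) * (K * K) + (N % (K * K)) / K * K + N % K = N := by
  have hKK : 0 < K * K := Nat.mul_pos hK hK
  have h1 := Nat.div_add_mod N (K * K)
  have h2 := Nat.div_add_mod (N % (K * K)) K
  have h3 : N % (K * K) % K = N % K := Nat.mod_mod_of_dvd N ⟨K, rfl⟩
  nlinarith [h1, h2, h3]

lemma pv_set_map_range {α : Type} (f : Nat → α) (K a : Nat) (v : α) (ha : a < K) :
    ((List.range K).map f).set a v
      = (List.range K).map (fun x => if x = a then v else f x) := by
  apply List.ext_getElem
  · simp
  · intro i h1 h2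
    simp only [List.getElem_set, List.getElem_map, List.getElem_range] at *
    by_cases h : a = i <;> simp [h] <;> omega

lemma pv_getD_map_range {α : Type} (f : Nat → α) (K a : Nat) (d : α) (ha : a < K) :
    ((List.range K).map f).getD a d = f a := by
  simp [List.getD_eq_getElem?_getD, ha]

lemma pvCell_succ_ne (s : List Char) (N m : Nat) (h : m ≠ N) :
    pvCell s (N + 1) m = pvCell s N m := by
  unfold pvCell
  by_cases hm : m < N
  · rw [if_pos (by omega), if_pos hm]
  · rw [if_neg (by omega), if_neg hm]

lemma pv_set3_cube (s : List Char) (K N : Nat) (hK : 0 < K) (hN : N < K * K * K) :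
    pvSet3 (pvCube s K N) (N / (K * K) : Nat) ((N % (K * K)) / K : Nat) (N % K : Nat)
      (pvCh s N) = pvCube s K (N + 1) := by
  have hKK : 0 < K * K := Nat.mul_pos hK hK
  set a := N / (K * K) with hadef
  set b := (N % (K * K)) / K with hbdef
  set c := N % K with hcdef
  have ha : a < K := by
    rw [hadef, Nat.div_lt_iff_lt_mul hKK]; calc N < K * K * K := hN
                                            _ = K * (K * K) := by ring
  have hb : b < K := by
    rw [hbdef, Nat.div_lt_iff_lt_mul hK]; exact Nat.mod_lt _ hKK
  have hc : c < K := Nat.mod_lt _ hK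
  have hrec : a * (K * K) + b * K + c = N := pv_recompose K N hK
  unfold pvSet3 pvCube
  simp only [Int.toNat_natCast]
  rw [pv_getD_map_range _ _ _ _ ha, pv_getD_map_range _ _ _ _ hb,
    pv_set_map_range _ _ _ _ hc, pv_set_map_range _ _ _ _ hb,
    pv_set_map_range _ _ _ _ ha]
  apply List.map_congr_left
  intro x hx
  rw [List.mem_range] at hx
  by_cases hxa : x = a
  · subst hxa
    rw [if_pos rfl]
    apply List.map_congr_left
    intro y hy
    rw [List.mem_range] at hy
    by_cases hyb : y = b
    · subst hyb
      rw [if_pos rfl]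
      apply List.map_congr_left
      intro z hz
      rw [List.mem_range] at hz
      by_cases hzc : z = c
      · subst hzc
        rw [if_pos rfl, hrec]
        unfold pvCell
        rw [if_pos (by omega)]
      · rw [if_neg hzc, pvCell_succ_ne]
        intro hEq
        exact hzc ((pv_digits3 K a b z hK hb hz).2.2.symm.trans (by rw [hEq]))
    · rw [if_neg hyb]
      apply List.map_congr_left
      intro z hz
      rw [List.mem_range] at hz
      rw [pvCell_succ_ne]
      intro hEq
      exact hyb ((pv_digits3 K a y z hK hy hz).2.1.symm.trans (by rw [hEq]))
  · rw [if_neg hxa]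
    apply List.map_congr_left
    intro y hy
    rw [List.mem_range] at hy
    apply List.map_congr_left
    intro z hz
    rw [List.mem_range] at hz
    rw [pvCell_succ_ne]
    intro hEq
    exact hxa ((pv_digits3 K x y z hK hy hz).1.symm.trans (by rw [hEq]))

lemma pv_fold (alfa : String) (K : Nat) (hK : 0 < K) (N : Nat) (hN : N ≤ K * K * K) :
    (PySem.List.pyRange 0 (N : Int) 1).foldl
      (fun (st : List (List (List String)) × Int × Int) i =>
        let m := st.1
        let pos := st.2.1
        let pos2 := st.2.2
        let pp : Int × Int :=
          if PySem.Int.mod i ((K : Int) * (K : Int)) = 0 then (-1, pos2 + 1) else (pos, pos2)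
        let pos2 := pp.2
        let pos := if PySem.Int.mod i (K : Int) = 0 then pp.1 + 1 else pp.1
        (pvSet3 m pos2 pos (PySem.Int.mod i (K : Int))
          (((PySem.Str.pyGet? alfa i).map (fun ch => String.ofList [ch])).getD " "),
         pos, pos2))
      (pvCube alfa.toList K 0, -1, -1)
    = (pvCube alfa.toList K N, pvPos K N, pvPos2 K N) := by
  induction N with
  | zero => simp [PySem.List.pyRange_one_eq_nil, pvPos, pvPos2]
  | succ N ih =>
    have hN' : N ≤ K * K * K := by omega
    have hlt : N < K * K * K := by omega
    have hKK : 0 < K * K := Nat.mul_pos hK hK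
    have hsplit : PySem.List.pyRange 0 ((N + 1 : Nat) : Int) 1
        = PySem.List.pyRange 0 (N : Int) 1 ++ [(N : Int)] := by
      push_cast
      exact PySem.List.pyRange_one_succ_right (by positivity)
    rw [hsplit, List.foldl_append, ih hN']
    -- one step at i = N
    simp only [List.foldl_cons, List.foldl_nil]
    have hmodKK : PySem.Int.mod (N : Int) ((K : Int) * (K : Int)) = ((N % (K * K) : Nat) : Int) := by
      rw [show ((K : Int) * (K : Int)) = ((K * K : Nat) : Int) by push_cast; ring]
      exact PySem.Int.mod_natCast N (K * K)
    have hmodK : PySem.Int.mod (N : Int) (K : Int) = ((N % K : Nat) : Int) :=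
      PySem.Int.mod_natCast N K
    have hch : ((PySem.Str.pyGet? alfa (N : Int)).map (fun ch => String.ofList [ch])).getD " "
        = pvCh alfa.toList N := by
      rw [PySem.Str.pyGet?_natCast]; rfl
    -- the new pos2 / pos values
    have hpos2 : (if PySem.Int.mod (N : Int) ((K : Int) * (K : Int)) = 0
        then ((-1 : Int), pvPos2 K N + 1) else (pvPos K N, pvPos2 K N)).2
        = pvPos2 K (N + 1) := by
      rw [hmodKK]
      by_cases hdvd : (K * K) ∣ N
      · rw [if_pos (by exact_mod_cast Nat.dvd_iff_mod_eq_zero.mp hdvd)]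
        by_cases hz : N = 0
        · subst hz; simp [pvPos2]
        · unfold pvPos2
          rw [if_neg hz, if_neg (Nat.succ_ne_zero N)]
          simp only [Nat.add_sub_cancel]
          have h := pv_succ_div_dvd (K * K) N hdvd hz
          exact_mod_cast h
      · rw [if_neg (fun h => hdvd (Nat.dvd_iff_mod_eq_zero.mpr (by exact_mod_cast h)))]
        have hz : N ≠ 0 := fun h0 => hdvd (h0 ▸ dvd_zero _)
        unfold pvPos2
        rw [if_neg hz, if_neg (Nat.succ_ne_zero N)]
        simp only [Nat.add_sub_cancel]
        have h := pv_succ_div_not_dvd (K * K) N hdvd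
        exact_mod_cast h
    have hKdvdKK : K ∣ K * K := ⟨K, rfl⟩
    have hpos : (if PySem.Int.mod (N : Int) (K : Int) = 0
        then (if PySem.Int.mod (N : Int) ((K : Int) * (K : Int)) = 0
          then ((-1 : Int), pvPos2 K N + 1) else (pvPos K N, pvPos2 K N)).1 + 1
        else (if PySem.Int.mod (N : Int) ((K : Int) * (K : Int)) = 0
          then ((-1 : Int), pvPos2 K N + 1) else (pvPos K N, pvPos2 K N)).1)
        = pvPos K (N + 1) := by
      rw [hmodKK, hmodK]
      by_cases hdvd1 : K ∣ N
      · rw [if_pos (by exact_mod_cast Nat.dvd_iff_mod_eq_zero.mp hdvd1)]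
        by_cases hdvd2 : (K * K) ∣ N
        · rw [if_pos (by exact_mod_cast Nat.dvd_iff_mod_eq_zero.mp hdvd2)]
          unfold pvPos
          rw [if_neg (Nat.succ_ne_zero N)]
          simp only [Nat.add_sub_cancel]
          rw [Nat.dvd_iff_mod_eq_zero.mp hdvd2]
          simp
        · rw [if_neg (fun h => hdvd2 (Nat.dvd_iff_mod_eq_zero.mpr (by exact_mod_cast h)))]
          have hz : N ≠ 0 := fun h0 => hdvd2 (h0 ▸ dvd_zero _)
          have hmodne : N % (K * K) ≠ 0 := fun h => hdvd2 (Nat.dvd_iff_mod_eq_zero.mpr h)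
          have hpred : (N - 1) % (K * K) = N % (K * K) - 1 := pv_pred_mod (K * K) N hKK hdvd2
          have hdvdr : K ∣ N % (K * K) := (Nat.dvd_mod_iff hKdvdKK).2 hdvd1
          unfold pvPos
          rw [if_neg hz, if_neg (Nat.succ_ne_zero N)]
          simp only [Nat.add_sub_cancel]
          rw [hpred]
          have h := pv_succ_div_dvd K (N % (K * K)) hdvdr hmodne
          exact_mod_cast h
      · rw [if_neg (fun h => hdvd1 (Nat.dvd_iff_mod_eq_zero.mpr (by exact_mod_cast h)))]
        have hdvd2 : ¬ (K * K) ∣ N := fun h => hdvd1 (hKdvdKK.trans h)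
        rw [if_neg (fun h => hdvd2 (Nat.dvd_iff_mod_eq_zero.mpr (by exact_mod_cast h)))]
        have hz : N ≠ 0 := fun h0 => hdvd1 (h0 ▸ dvd_zero _)
        have hpred : (N - 1) % (K * K) = N % (K * K) - 1 := pv_pred_mod (K * K) N hKK hdvd2
        have hdvdr : ¬ K ∣ N % (K * K) := fun h => hdvd1 ((Nat.dvd_mod_iff hKdvdKK).1 h)
        unfold pvPos
        rw [if_neg hz, if_neg (Nat.succ_ne_zero N)]
        simp only [Nat.add_sub_cancel]
        rw [hpred]
        have h := pv_succ_div_not_dvd K (N % (K * K)) hdvdr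
        exact_mod_cast h
    rw [hch, hpos2, hpos, hmodK]
    -- matrix update
    have hm : pvSet3 (pvCube alfa.toList K N) (pvPos2 K (N + 1)) (pvPos K (N + 1))
        ((N % K : Nat) : Int) (pvCh alfa.toList N) = pvCube alfa.toList K (N + 1) := by
      have h2 : pvPos2 K (N + 1) = ((N / (K * K) : Nat) : Int) := by
        unfold pvPos2; rw [if_neg (Nat.succ_ne_zero N)]; simp
      have h1 : pvPos K (N + 1) = (((N % (K * K)) / K : Nat) : Int) := by
        unfold pvPos; rw [if_neg (Nat.succ_ne_zero N)]; simp
      rw [h2, h1]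
      exact pv_set3_cube alfa.toList K N hK hlt
    rw [hm]

lemma pv_alt_eq (alfa : String) (K : Nat) :
    POLYBIUS_CUBE_alt alfa (K : Int)
      = pvCube alfa.toList K (min alfa.toList.length (K * K * K)) := by
  unfold POLYBIUS_CUBE_alt pvCube
  rw [PySem.List.pyRange_one]
  simp only [List.map_map, Int.sub_zero, Int.toNat_natCast]
  apply List.map_congr_left
  intro x hx
  apply List.map_congr_left
  intro y hy
  apply List.map_congr_left
  intro z hz
  simp only [Function.comp]
  have hidx : (0 + (x : Int)) * K * K + (0 + (y : Int)) * K + (0 + (z : Int))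
      = ((x * (K * K) + y * K + z : Nat) : Int) := by push_cast; ring
  have hlen : PySem.Str.len alfa = (alfa.toList.length : Int) := by
    simp [PySem.Str.len_eq]
  have hmin : min (PySem.Str.len alfa) ((K : Int) * K * K)
      = ((min alfa.toList.length (K * K * K) : Nat) : Int) := by
    rw [hlen]; push_cast; ring_nf
  unfold pvCell pvCh
  rw [hidx]
  by_cases hc : x * (K * K) + y * K + z < min alfa.toList.length (K * K * K)
  · rw [if_pos (by rw [hmin]; exact_mod_cast hc), if_pos hc,
      PySem.Str.pyGet?_natCast]
  · rw [if_neg (by rw [hmin]; exact_mod_cast hc), if_neg hc]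

lemma pv_init_eq (alfa : String) (K : Nat) :
    (PySem.List.pyRange 0 (K : Int) 1).foldl (fun m _ =>
        m ++ [(PySem.List.pyRange 0 (K : Int) 1).foldl (fun r _ =>
          r ++ [(PySem.List.pyRange 0 (K : Int) 1).foldl
            (fun p _ => p ++ [" "]) []]) []]) []
      = pvCube alfa.toList K 0 := by
  have hrow : ∀ {α : Type} (g : Int → α) (init : List α),
      (PySem.List.pyRange 0 (K : Int) 1).foldl (fun acc i => acc ++ [g i]) init
        = init ++ (PySem.List.pyRange 0 (K : Int) 1).map g := by
    intro α g init
    induction PySem.List.pyRange 0 (K : Int) 1 generalizing init with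
    | nil => simp
    | cons a l ih => simp [ih]
  simp only [hrow, List.nil_append]
  simp [pvCube, pvCell, PySem.List.pyRange_one, List.map_map, Function.comp_def]

lemma pv_A_eq (alfa : String) (K : Nat) (hK : 0 < K) :
    POLYBIUS_CUBE alfa (K : Int)
      = pvCube alfa.toList K (min alfa.toList.length (K * K * K)) := by
  have hn : (if PySem.Str.len alfa > (K : Int) * K * K then (K : Int) * K * K
      else PySem.Str.len alfa)
      = ((min alfa.toList.length (K * K * K) : Nat) : Int) := by
    have hlen : PySem.Str.len alfa = (alfa.toList.length : Int) := by
      simp [PySem.Str.len_eq]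
    rw [hlen]
    have hcast : ((K : Int) * K * K) = ((K * K * K : Nat) : Int) := by push_cast; ring
    rw [hcast]
    split_ifs with h
    · have : K * K * K ≤ alfa.toList.length := by exact_mod_cast le_of_lt h
      rw [Nat.min_eq_right this]
    · have : alfa.toList.length ≤ K * K * K := by exact_mod_cast not_lt.mp h
      rw [Nat.min_eq_left this]
  have hf := pv_fold alfa K hK (min alfa.toList.length (K * K * K))
    (Nat.min_le_right _ _)
  simp only [POLYBIUS_CUBE]
  rw [pv_init_eq alfa K, hn, hf]

lemma pv_nonpos_A (alfa : String) (key : Int) (hk : key ≤ 0) :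
    POLYBIUS_CUBE alfa key = [] := by
  have h3 : key * key * key ≤ 0 := by nlinarith
  have hlen0 : (0 : Int) ≤ PySem.Str.len alfa := by
    simp [PySem.Str.len_eq]
  have hn0 : (if PySem.Str.len alfa > key * key * key then key * key * key
      else PySem.Str.len alfa) ≤ 0 := by
    split_ifs with h
    · exact h3
    · omega
  simp only [POLYBIUS_CUBE]
  rw [PySem.List.pyRange_one_eq_nil hk, PySem.List.pyRange_one_eq_nil hn0]
  simp

lemma pv_nonpos_B (alfa : String) (key : Int) (hk : key ≤ 0) :
    POLYBIUS_CUBE_alt alfa key = [] := by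
  simp only [POLYBIUS_CUBE_alt]
  rw [PySem.List.pyRange_one_eq_nil hk]
  simp

-- ===== VERDICT (by name: the statement is the Claim_ definition above) =====
theorem POLYBIUS_CUBE_spec : Claim_equal_POLYBIUS_CUBE := by
  intro alfa key _
  unfold Spec_POLYBIUS_CUBE
  by_cases hk : 0 < key
  · obtain ⟨K, rfl⟩ : ∃ K : Nat, key = (K : Int) := ⟨key.toNat, by omega⟩
    have hK : 0 < K := by exact_mod_cast hk
    rw [pv_A_eq alfa K hK, pv_alt_eq alfa K]
  · rw [pv_nonpos_A alfa key (by omega), pv_nonpos_B alfa key (by omega)]
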